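-- pv_equiv track=rewrite | github.com/5sursyncIT/smartqueueV2 | backend/apps/core/middleware.py | _tenant_from_path
-- ===== SOURCE A (Python) =====
-- def _tenant_from_path(path: str) -> str | None:
--     if "/tenants/" not in path:
--         return None
--     segments = [segment for segment in path.split("/") if segment]
--     try:
--         idx = segments.index("tenants")
--     except ValueError:
--         return None
--     if idx + 1 < len(segments):
--         return segments[idx + 1]
--     return None
-- ===== SOURCE B (Python) =====
-- def _next_segment(s):
--     """Drop leading slashes; return (first segment, remainder) or None if no segment is left."""
--     while s.startswith("/"):
--         s = s[1:]
--     if not s: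
--         return None
--     cut = s.find("/")
--     if cut < 0:
--         return (s, "")
--     return (s[:cut], s[cut:])
--
--
-- def _tenant_from_path(path: str) -> str | None:
--     if "/tenants/" not in path:
--         return None
--     rest = path
--     while True:
--         nxt = _next_segment(rest)
--         if nxt is None:
--             return None
--         seg, rest = nxt
--         if seg == "tenants":
--             nxt = _next_segment(rest)
--             return nxt[0] if nxt is not None else None
-- ===== Notes on version B (the rewrite author's own statement) =====
-- stated objective: alternative
-- what changed: A splits the whole path into a segment list, calls index('tenants') and reads the neighbour with a bounds check; B never builds a segment list: it keeps a string cursor and repeatedly peels one segment off the front (strip leading '/', cut at the next '/'), returning the segment peeled right after 'tenants'.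
import Mathlib
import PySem

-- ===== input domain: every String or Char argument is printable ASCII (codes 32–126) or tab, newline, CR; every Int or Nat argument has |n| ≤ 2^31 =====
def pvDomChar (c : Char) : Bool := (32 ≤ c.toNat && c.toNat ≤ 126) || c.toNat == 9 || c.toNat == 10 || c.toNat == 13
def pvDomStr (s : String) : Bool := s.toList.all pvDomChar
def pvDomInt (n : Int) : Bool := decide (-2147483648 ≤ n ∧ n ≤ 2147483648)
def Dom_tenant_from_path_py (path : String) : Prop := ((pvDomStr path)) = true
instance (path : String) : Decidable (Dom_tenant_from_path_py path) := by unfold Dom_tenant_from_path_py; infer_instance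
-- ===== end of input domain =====

-- B replaces A's "split into a segment list, index('tenants'), read the neighbour" by a
-- string-cursor scan that peels one segment at a time off the raw path (no segment list is built).

-- ===== PORT A =====
-- Transliteration of A: guard on "/tenants/", build non-empty segment list,
-- find the index of "tenants", return the following segment if in range.
def tenant_from_path_py (path : String) : Option String :=
  if PySem.Str.isIn "/tenants/" path = false then none
  else
    let segments := ((PySem.Str.split? path "/").getD []).filter (fun s => decide (s ≠ ""))
    match PySem.List.index? segments "tenants" with
    | none => none
    | some idx =>
      if idx + 1 < segments.length then PySem.List.pyGet? segments ((idx : Int) + 1)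
      else none

-- ===== PORT B =====
-- _next_segment from Source B: the startswith/s[1:] loop is exactly dropWhile of '/';
-- then cut at the first '/' via find; s[:cut] / s[cut:] are the slices.
def pvNextSeg (s : List Char) : Option (List Char × List Char) :=
  let t := s.dropWhile (fun c => c == '/')
  if t = [] then none
  else
    let cut := PySem.Chars.find t ['/']
    if cut < 0 then some (t, [])
    else some (PySem.Chars.slice t none (some cut), PySem.Chars.slice t (some cut) none)

-- termination helper for the while-loop below: the remainder strictly shrinks
lemma pvNextSeg_rest_lt (s seg rest : List Char)
    (h : pvNextSeg s = some (seg, rest)) : rest.length < s.length := by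
  unfold pvNextSeg at h
  set t := s.dropWhile (fun c => c == '/') with ht
  by_cases h0 : t = []
  · simp [h0] at h
  · have hlen : t.length ≤ s.length := by
      simpa [ht] using List.length_dropWhile_le (fun c => c == '/') s
    have htpos : 0 < t.length := List.length_pos_iff.mpr h0
    simp only [if_neg h0] at h
    by_cases hneg : PySem.Chars.find t ['/'] < 0
    · simp only [if_pos hneg, Option.some.injEq, Prod.mk.injEq] at h
      have : rest = [] := h.2.symm
      subst this; simp; omega
    · simp only [if_neg hneg, Option.some.injEq, Prod.mk.injEq] at h
      have hfpos : 0 ≤ PySem.Chars.find t ['/'] := by omega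
      -- cut ≠ 0: t starts with a non-'/' character
      have hfind0 : PySem.Chars.find t ['/'] ≠ 0 := by
        intro h0'
        have hsp := (PySem.Chars.find_spec (s := t) (sub := ['/']) hfpos).1
        rw [h0'] at hsp
        rcases hsp with ⟨u, hu⟩
        simp at hu
        have hhd := List.head?_dropWhile_not (fun c => c == '/') s
        rw [← ht, ← hu] at hhd
        simp at hhd
      have hrest : rest = t.drop (PySem.Chars.find t ['/']).toNat := by
        rw [← h.2, PySem.Chars.slice_eq_listSlice, PySem.List.slice_from t hfpos]
      rw [hrest, List.length_drop]
      omega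

-- the while-loop of _tenant_from_path in Source B: peel a segment; on "tenants" return the next one
def pvScan (s : List Char) : Option (List Char) :=
  match h : pvNextSeg s with
  | none => none
  | some (seg, rest) =>
    if seg = "tenants".toList then (pvNextSeg rest).map Prod.fst
    else pvScan rest
termination_by s.length
decreasing_by exact pvNextSeg_rest_lt s seg rest h

def tenant_from_path_py_alt (path : String) : Option String :=
  if PySem.Str.isIn "/tenants/" path then (pvScan path.toList).map String.ofList
  else none

-- ===== PRECONDITION & SPEC =====
def Spec_tenant_from_path_py (path : String) (out : Option String) : Prop := out = tenant_from_path_py_alt path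
instance (path : String) (out : Option String) : Decidable (Spec_tenant_from_path_py path out) := by unfold Spec_tenant_from_path_py; infer_instance

-- ===== CLAIM (what is proved, stated in full; the proofs are below) =====
def Claim_equal_tenant_from_path_py : Prop := ∀ (path : String), Dom_tenant_from_path_py path → Spec_tenant_from_path_py path (tenant_from_path_py path)

-- ===== LEMMAS AND PROOFS =====

-- "first 'tenants' segment, then its neighbour" as a simple structural recursion
def pvFirstAfter : List String → Option String
  | [] => none
  | s :: rest => if s = "tenants" then rest.head? else pvFirstAfter rest

-- the char-level twin of pvFirstAfter
def pvFirstAfterC : List (List Char) → Option (List Char)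
  | [] => none
  | s :: rest => if s = "tenants".toList then rest.head? else pvFirstAfterC rest

-- reference splitter: PySem.Chars.splitOn _ ['/'] with its fuel and accumulators removed
def pvSplit : List Char → List Char → List (List Char)
  | [], cur => [cur.reverse]
  | c :: rest, cur =>
    if c == '/' then cur.reverse :: pvSplit rest [] else pvSplit rest (c :: cur)

-- the non-empty pieces of the path
def pvSegs (cs : List Char) : List (List Char) :=
  (pvSplit cs []).filter (fun l => decide (l ≠ []))

-- A's index-then-neighbour expression is pvFirstAfter
lemma indexNext_eq_firstAfter (l : List String) :
    (match PySem.List.index? l "tenants" with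
     | none => none
     | some idx =>
       if idx + 1 < l.length then PySem.List.pyGet? l ((idx : Int) + 1)
       else none)
    = pvFirstAfter l := by
  induction l with
  | nil => simp [PySem.List.index?, pvFirstAfter]
  | cons a t ih =>
    by_cases ha : a = "tenants"
    · subst ha
      rw [PySem.List.index?_cons_self]
      cases t with
      | nil => simp [pvFirstAfter]
      | cons b t' => simp [pvFirstAfter]
    · rw [PySem.List.index?_cons_of_ne t ha]
      simp only [pvFirstAfter, if_neg ha]
      rw [← ih]
      cases hidx : PySem.List.index? t "tenants" with
      | none => simp
      | some j =>
        simp only [Option.map_some]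
        by_cases hlt : j + 1 < t.length
        · rw [if_pos hlt,
              if_pos (show j + 1 + 1 < (a :: t).length from by simpa using Nat.succ_lt_succ hlt)]
          rw [PySem.List.pyGet?_cons_succ]
          norm_num [PySem.List.pyGet?_natCast]
        · rw [if_neg hlt,
              if_neg (show ¬ j + 1 + 1 < (a :: t).length from fun h =>
                hlt (by simpa using Nat.lt_of_succ_lt_succ h))]

-- splitOn.go with enough fuel is pvSplit
lemma splitOn_go_eq (fuel : Nat) (l cur : List Char) (acc : List (List Char)) (h : l.length ≤ fuel) :
    PySem.Chars.splitOn.go ['/'] fuel l cur acc = acc.reverse ++ pvSplit l cur := by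
  induction fuel generalizing l cur acc with
  | zero =>
    have hl : l = [] := List.length_eq_zero_iff.mp (Nat.le_zero.mp h)
    subst hl
    simp [PySem.Chars.splitOn.go, pvSplit]
  | succ fuel ih =>
    cases l with
    | nil => simp [PySem.Chars.splitOn.go, pvSplit]
    | cons c rest =>
      by_cases hc : c = '/'
      · subst hc
        have : PySem.Chars.splitOn.go ['/'] (fuel + 1) ('/' :: rest) cur acc
            = PySem.Chars.splitOn.go ['/'] fuel rest [] (cur.reverse :: acc) := by
          simp [PySem.Chars.splitOn.go, List.isPrefixOf]
        rw [this, ih rest [] (cur.reverse :: acc) (by simpa using Nat.lt_succ_iff.mp (by simpa using h))]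
        simp [pvSplit]
      · have : PySem.Chars.splitOn.go ['/'] (fuel + 1) (c :: rest) cur acc
            = PySem.Chars.splitOn.go ['/'] fuel rest (c :: cur) acc := by
          simp [PySem.Chars.splitOn.go, List.isPrefixOf, Ne.symm hc]
        rw [this, ih rest (c :: cur) acc (by simpa using Nat.lt_succ_iff.mp (by simpa using h))]
        simp [pvSplit, hc]

lemma splitOn_eq_pvSplit (cs : List Char) :
    PySem.Chars.splitOn cs ['/'] = pvSplit cs [] := by
  simpa using splitOn_go_eq (cs.length + 1) cs [] [] (by omega)

-- A's filtered segment list is pvSegs, mapped to String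
lemma segments_eq (path : String) :
    ((PySem.Str.split? path "/").getD []).filter (fun s => decide (s ≠ ""))
    = (pvSegs path.toList).map String.ofList := by
  have h1 : PySem.Str.split? path "/" = some ((pvSplit path.toList []).map String.ofList) := by
    rw [PySem.Str.split?.eq_1]
    have : PySem.Chars.split? path.toList "/".toList
        = some (PySem.Chars.splitOn path.toList ['/']) := by
      rw [PySem.Chars.split?.eq_1]; rfl
    rw [this, splitOn_eq_pvSplit]
    rfl
  rw [h1]
  simp only [Option.getD_some, pvSegs, List.filter_map]
  congr 1
  apply List.filter_congr
  intro l _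
  simp [String.ofList_eq_empty_iff]

lemma firstAfter_map (l : List (List Char)) :
    pvFirstAfter (l.map String.ofList) = (pvFirstAfterC l).map String.ofList := by
  induction l with
  | nil => simp [pvFirstAfter, pvFirstAfterC]
  | cons a t ih =>
    simp only [List.map_cons, pvFirstAfter, pvFirstAfterC]
    by_cases ha : a = "tenants".toList
    · subst ha
      simp [List.head?_map]
    · have : ¬ String.ofList a = "tenants" := by
        intro hh
        exact ha (by simpa using congrArg String.toList hh)
      rw [if_neg this, if_neg ha, ih]

-- a leading slash never contributes a segment
lemma pvSegs_slash_cons (cs : List Char) : pvSegs ('/' :: cs) = pvSegs cs := by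
  simp [pvSegs, pvSplit]

-- pvSplit with an accumulator: first piece and the rest
lemma pvSplit_decompose (cs cur : List Char) :
    pvSplit cs cur
    = (cur.reverse ++ cs.takeWhile (fun c => !(c == '/')))
      :: (match cs.dropWhile (fun c => !(c == '/')) with
          | [] => []
          | _ :: r' => pvSplit r' []) := by
  induction cs generalizing cur with
  | nil => simp [pvSplit]
  | cons c rest ih =>
    by_cases hc : c = '/'
    · subst hc; simp [pvSplit]
    · simp only [pvSplit, List.takeWhile_cons, List.dropWhile_cons, ih (c :: cur)]
      simp [hc]

-- takeWhile/dropWhile at the first occurrence of '/'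
lemma seg_split (t : List Char) (k : Nat) (hk : t[k]? = some '/')
    (hmin : ∀ i, i < k → t[i]? ≠ some '/') :
    t.takeWhile (fun c => !(c == '/')) = t.take k
    ∧ t.dropWhile (fun c => !(c == '/')) = t.drop k := by
  induction t generalizing k with
  | nil => simp at hk
  | cons a rest ih =>
    cases k with
    | zero =>
      simp only [List.getElem?_cons_zero, Option.some.injEq] at hk
      subst hk
      simp
    | succ k =>
      have ha : a ≠ '/' := by
        intro hh
        exact hmin 0 (Nat.succ_pos k) (by simp [hh])
      have := ih k (by simpa using hk) (fun i hi => by simpa using hmin (i + 1) (by omega))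
      simp [ha, this.1, this.2]

-- pvNextSeg in takeWhile/dropWhile form
lemma pvNextSeg_eq (s : List Char) :
    pvNextSeg s
    = match s.dropWhile (fun c => c == '/') with
      | [] => none
      | t => some (t.takeWhile (fun c => !(c == '/')), t.dropWhile (fun c => !(c == '/'))) := by
  unfold pvNextSeg
  set t := s.dropWhile (fun c => c == '/') with ht
  cases h0 : t with
  | nil => simp [h0]
  | cons c t' =>
    have hc : (c == '/') = false := by
      have hhd := List.head?_dropWhile_not (fun c => c == '/') s
      rw [← ht, h0] at hhd
      simpa using hhd
    simp only [h0, if_neg (by simp : ¬ (c :: t' : List Char) = [])]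
    by_cases hneg : PySem.Chars.find (c :: t') ['/'] < 0
    · have hmem : '/' ∉ (c :: t' : List Char) := by
        have : PySem.Chars.find (c :: t') ['/'] = -1 := by
          have := PySem.Chars.neg_one_le_find (c :: t') ['/']
          omega
        have := (PySem.Chars.find_eq_neg_one_iff (c :: t') ['/']).mp this
        intro hm
        exact this ((List.singleton_infix_iff '/' (c :: t')).mpr hm)
      have hall : ∀ a ∈ (c :: t' : List Char), (!(a == '/')) = true := by
        intro a ha
        simp only [Bool.not_eq_true']
        exact beq_eq_false_iff_ne.mpr (fun hh => hmem (hh ▸ ha))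
      rw [if_pos hneg, List.takeWhile_eq_self_iff.mpr hall, List.dropWhile_eq_nil_iff.mpr hall]
    · have hfpos : 0 ≤ PySem.Chars.find (c :: t') ['/'] := by omega
      set k := (PySem.Chars.find (c :: t') ['/']).toNat with hk
      obtain ⟨hpre, hmin⟩ := PySem.Chars.find_spec (s := c :: t') (sub := ['/']) hfpos
      have hget : (c :: t' : List Char)[k]? = some '/' := by
        rcases hpre with ⟨u, hu⟩
        rw [← List.head?_drop, ← hu]
        simp
      have hminget : ∀ i, i < k → (c :: t' : List Char)[i]? ≠ some '/' := by
        intro i hi hcontra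
        apply hmin i hi
        have : (List.drop i (c :: t')).head? = some '/' := by
          rw [List.head?_drop]; exact hcontra
        cases hd : List.drop i (c :: t') with
        | nil => rw [hd] at this; simp at this
        | cons d r =>
          rw [hd] at this
          simp only [List.head?_cons, Option.some.injEq] at this
          subst this
          exact ⟨r, rfl⟩
      obtain ⟨htake, hdrop⟩ := seg_split (c :: t') k hget hminget
      rw [if_neg hneg, PySem.Chars.slice_eq_listSlice, PySem.Chars.slice_eq_listSlice,
          PySem.List.slice_to _ hfpos, PySem.List.slice_from _ hfpos,
          ← hk, ← htake, ← hdrop]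

-- the key correspondence: one pvNextSeg step peels exactly the head of pvSegs
lemma pvNextSeg_segs (cs : List Char) :
    (match pvNextSeg cs with
     | none => pvSegs cs = []
     | some (seg, rest) => pvSegs cs = seg :: pvSegs rest) := by
  have hred : pvSegs cs = pvSegs (cs.dropWhile (fun c => c == '/')) := by
    induction cs with
    | nil => rfl
    | cons c rest ih =>
      by_cases hc : c = '/'
      · subst hc
        rw [show (('/' :: rest).dropWhile (fun c => c == '/')) = rest.dropWhile (fun c => c == '/') by simp,
            pvSegs_slash_cons]
        exact ih
      · rw [List.dropWhile_cons_of_neg (by simpa using hc)]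
  rw [pvNextSeg_eq]
  cases h0 : cs.dropWhile (fun c => c == '/') with
  | nil =>
    simp only []
    rw [hred, h0]
    simp [pvSegs, pvSplit]
  | cons c t' =>
    have hc : (c == '/') = false := by
      have hhd := List.head?_dropWhile_not (fun c => c == '/') cs
      rw [h0] at hhd
      simpa using hhd
    simp only []
    rw [hred, h0]
    rw [show pvSegs (c :: t') = ((pvSplit (c :: t') []).filter (fun l => decide (l ≠ []))) from rfl,
        pvSplit_decompose]
    have hseg_ne : ((c :: t').takeWhile (fun c => !(c == '/'))) ≠ [] := by
      rw [List.takeWhile_cons_of_pos (by simp [hc])]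
      simp
    cases hr : (c :: t').dropWhile (fun c => !(c == '/')) with
    | nil =>
      simp only [List.reverse_nil, List.nil_append, List.filter_cons, decide_eq_true_eq,
        if_pos hseg_ne]
      simp [pvSegs, pvSplit]
    | cons d r' =>
      have hd : d = '/' := by
        have hhd := List.head?_dropWhile_not (fun c => !(c == '/')) (c :: t')
        rw [hr] at hhd
        simpa using hhd
      subst hd
      simp only [List.reverse_nil, List.nil_append, List.filter_cons, decide_eq_true_eq,
        if_pos hseg_ne]
      rw [pvSegs_slash_cons]
      rfl

lemma pvNextSeg_head (cs : List Char) :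
    (pvNextSeg cs).map Prod.fst = (pvSegs cs).head? := by
  have := pvNextSeg_segs cs
  cases h : pvNextSeg cs with
  | none => rw [h] at this; rw [this]; rfl
  | some pr => rw [h] at this; rw [this]; rfl

lemma pvScan_eq_firstAfterC (cs : List Char) :
    pvScan cs = pvFirstAfterC (pvSegs cs) := by
  induction hn : cs.length using Nat.strong_induction_on generalizing cs with
  | _ n ih =>
    have hkey := pvNextSeg_segs cs
    rw [pvScan]
    cases h : pvNextSeg cs with
    | none =>
      rw [h] at hkey
      rw [hkey]
      rfl
    | some pr =>
      obtain ⟨seg, rest⟩ := pr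
      rw [h] at hkey
      rw [hkey]
      by_cases hs : seg = "tenants".toList
      · simp only [if_pos hs, pvFirstAfterC, if_pos hs]
        rw [pvNextSeg_head]
      · simp only [if_neg hs, pvFirstAfterC, if_neg hs]
        subst hn
        exact ih rest.length (pvNextSeg_rest_lt cs seg rest h) rest rfl

-- ===== VERDICT (by name: the statement is the Claim_ definition above) =====
theorem tenant_from_path_py_spec : Claim_equal_tenant_from_path_py := by
  intro path _
  unfold Spec_tenant_from_path_py tenant_from_path_py tenant_from_path_py_alt
  cases h : PySem.Str.isIn "/tenants/" path
  · simp
  · simp only [Bool.true_eq_false, if_false, if_true]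
    rw [indexNext_eq_firstAfter, segments_eq, firstAfter_map, pvScan_eq_firstAfterC]
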